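-- pv_equiv track=rewrite | github.com/Jianghanxiao/Dezhou_poke | dezhou.py | leftHJTHS
-- ===== SOURCE A (Python) =====
-- ALL_SYMBOL = ('a', 'b', 'c', 'd')
--
-- ALL_CARD_SYMBOL = ('0','A', '2', '3', '4', '5', '6', '7', '8', '9', '10', 'J', 'Q', 'K', 'A')
--
-- def shunzi(x, n):
--     if n == 0 or n > 10:
--         raise ValueError("Coding Bug")
--     cards = []
--     for i in range(5):
--         cards.append(x+ALL_CARD_SYMBOL[n+i])
--     return tuple(cards)
--
-- def leftHJTHS(pool):
--     all_hjths = []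
--     for symbol in ALL_SYMBOL:
--         all_hjths.append(shunzi(symbol, 10))
--
--     min_left = 5
--     left = 0
--     for hjths in all_hjths:
--         left = 0
--         for i in range(5):
--             if hjths[i] not in pool:
--                 left += 1
--         min_left = min(left, min_left)
--
--     return min_left
-- ===== SOURCE B (Python) =====
-- ROYAL_SUIT = {s + r: s for s in ('a', 'b', 'c', 'd') for r in ('10', 'J', 'Q', 'K', 'A')}
--
--
-- def leftHJTHS(pool):
--     seen = {}
--     for card in pool:
--         suit = ROYAL_SUIT.get(card)
--         if suit is not None:
--             seen.setdefault(suit, set()).add(card)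
--     return 5 - max(len(seen.get(s, ())) for s in ('a', 'b', 'c', 'd'))
-- ===== Notes on version B (the rewrite author's own statement) =====
-- stated objective: faster
-- what changed: Replaces A's suit-outer/card-inner loops (20 membership scans of pool) by a precomputed dict mapping each royal card to its suit and a single pass over pool collecting per-suit sets of distinct royal cards, returning 5 minus the largest set size.
import Mathlib
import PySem

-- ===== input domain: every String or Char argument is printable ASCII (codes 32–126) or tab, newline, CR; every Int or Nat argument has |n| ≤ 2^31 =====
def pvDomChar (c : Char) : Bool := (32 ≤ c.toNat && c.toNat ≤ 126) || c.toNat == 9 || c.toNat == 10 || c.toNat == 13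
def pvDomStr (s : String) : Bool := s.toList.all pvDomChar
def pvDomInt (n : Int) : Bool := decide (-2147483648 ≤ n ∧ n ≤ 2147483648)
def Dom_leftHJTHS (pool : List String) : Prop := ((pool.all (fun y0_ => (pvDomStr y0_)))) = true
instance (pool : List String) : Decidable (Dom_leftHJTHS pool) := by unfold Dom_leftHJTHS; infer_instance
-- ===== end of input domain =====

-- B replaces A's suit-outer/card-inner membership scans over pool by one table-driven pass
-- over pool (dict card→suit, per-suit sets of distinct seen royal cards), then 5 - max.

-- ===== PORT A =====
def ALL_SYMBOL : List String := ["a", "b", "c", "d"]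

def ALL_CARD_SYMBOL : List String :=
  ["0", "A", "2", "3", "4", "5", "6", "7", "8", "9", "10", "J", "Q", "K", "A"]

-- 'raise ValueError' → none
def shunzi (x : String) (n : Int) : Option (List String) :=
  if n = 0 ∨ n > 10 then none
  else some ((PySem.List.pyRange 0 5 1).foldl
    (fun cards i => cards ++ [x ++ PySem.List.pyGetD ALL_CARD_SYMBOL (n + i) ""]) [])

def leftHJTHS (pool : List String) : Int :=
  let all_hjths : List (List String) :=
    ALL_SYMBOL.foldl (fun acc symbol => acc ++ [(shunzi symbol 10).getD []]) []
  all_hjths.foldl (fun min_left hjths =>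
    min ((PySem.List.pyRange 0 5 1).foldl
      (fun left i => if PySem.List.pyGetD hjths i "" ∈ pool then left else left + 1) 0)
      min_left) 5

-- ===== PORT B =====
def ROYAL_SUIT : PySem.Dict String String :=
  PySem.Dict.ofList ((["a", "b", "c", "d"] : List String).flatMap
    (fun s => (["10", "J", "Q", "K", "A"] : List String).map (fun r => (s ++ r, s))))

def leftHJTHS_alt (pool : List String) : Int :=
  let seen : PySem.Dict String (PySem.Set String) :=
    pool.foldl (fun seen card =>
      match ROYAL_SUIT.get? card with
      | some suit => seen.modify suit [] (fun st => PySem.Set.add st card)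
      | none => seen) PySem.Dict.empty
  match PySem.List.max?
      ((["a", "b", "c", "d"] : List String).map
        (fun s => PySem.Set.len (seen.getD s []))) (fun v => v) with
  | some m => 5 - m
  | none => 5  -- unreachable: the generator runs over a nonempty literal tuple, so Python's max never raises

-- ===== PRECONDITION & SPEC =====
def Spec_leftHJTHS (pool : List String) (out : Int) : Prop := out = leftHJTHS_alt pool
instance (pool : List String) (out : Int) : Decidable (Spec_leftHJTHS pool out) := by unfold Spec_leftHJTHS; infer_instance

-- ===== CLAIM (what is proved, stated in full; the proofs are below) =====
def Claim_equal_leftHJTHS : Prop := ∀ (pool : List String), Dom_leftHJTHS pool → Spec_leftHJTHS pool (leftHJTHS pool)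

-- ===== LEMMAS AND PROOFS =====

-- A's inner loop over one suit's five cards counts the missing ones.
lemma pv_inner_eq (pool : List String) (c0 c1 c2 c3 c4 : String) :
    (PySem.List.pyRange 0 5 1).foldl
      (fun left i => if PySem.List.pyGetD [c0, c1, c2, c3, c4] i "" ∈ pool then left else left + 1)
      (0 : Int)
    = 5 - (([c0, c1, c2, c3, c4].filter (fun c => decide (c ∈ pool))).length : Int) := by
  have hr : PySem.List.pyRange 0 5 1 = [0, 1, 2, 3, 4] := by decide
  rw [hr]
  simp only [List.foldl]
  have g0 : PySem.List.pyGetD [c0, c1, c2, c3, c4] 0 "" = c0 := rfl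
  have g1 : PySem.List.pyGetD [c0, c1, c2, c3, c4] 1 "" = c1 := rfl
  have g2 : PySem.List.pyGetD [c0, c1, c2, c3, c4] 2 "" = c2 := rfl
  have g3 : PySem.List.pyGetD [c0, c1, c2, c3, c4] 3 "" = c3 := rfl
  have g4 : PySem.List.pyGetD [c0, c1, c2, c3, c4] 4 "" = c4 := rfl
  rw [g0, g1, g2, g3, g4]
  by_cases h0 : c0 ∈ pool <;> by_cases h1 : c1 ∈ pool <;> by_cases h2 : c2 ∈ pool <;>
    by_cases h3 : c3 ∈ pool <;> by_cases h4 : c4 ∈ pool <;>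
    simp [List.filter, h0, h1, h2, h3, h4]

-- Python's max over four values, via PySem.List.max?.
lemma pv_max4 (a b c d : Int) :
    PySem.List.max? [a, b, c, d] (fun v => v) = some (max (max (max a b) c) d) := by
  rw [PySem.List.max?_id_cons]
  simp [List.foldl]

-- B's single pass: suit s's bucket collects (as a set, in order) the pool cards the table maps to s.
lemma pv_bucket (pool : List String) (d : PySem.Dict String (PySem.Set String)) (s : String) :
    (pool.foldl (fun seen card =>
      match ROYAL_SUIT.get? card with
      | some suit => seen.modify suit [] (fun st => PySem.Set.add st card)
      | none => seen) d).getD s []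
    = PySem.Set.update (d.getD s [])
        (pool.filter (fun c => ROYAL_SUIT.get? c == some s)) := by
  induction pool generalizing d with
  | nil => simp [PySem.Set.update]
  | cons c rest ih =>
    simp only [List.foldl, List.filter]
    cases hg : ROYAL_SUIT.get? c with
    | none =>
        rw [ih]
        simp
    | some s' =>
        rw [ih]
        by_cases hs : s' = s
        · subst hs
          simp [PySem.Dict.getD_modify_self, PySem.Set.update_cons]
        · have hb : (some s' == some s) = false := by simp [hs]
          have hne : s ≠ s' := Ne.symm hs
          simp [hb, PySem.Dict.getD_modify, hne]

-- the 20-entry table, looked up: which strings map to a given suit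
lemma pv_lookup (v : String) (royal : List String) (c : String)
    (h : (ROYAL_SUIT.items.filter (fun p => p.2 == v)).map (·.1) = royal)
    (hall : ∀ p ∈ ROYAL_SUIT.items, p.1 ∈ royal → p.2 = v) :
    ROYAL_SUIT.get? c = some v ↔ c ∈ royal := by
  have hnd : ROYAL_SUIT.keys.Nodup := by decide
  rw [PySem.Dict.get?_eq_some_iff_mem_items ROYAL_SUIT c v hnd]
  subst h
  constructor
  · intro hm
    simp only [List.mem_map, List.mem_filter]
    exact ⟨(c, v), ⟨hm, by simp⟩, rfl⟩
  · intro hm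
    simp only [List.mem_map, List.mem_filter] at hm
    obtain ⟨p, ⟨hp, hv⟩, hc⟩ := hm
    have : p.2 = v := by simpa using hv
    rw [← hc, ← this]
    exact hp

-- a suit bucket has as many elements as royal cards of that suit occur in pool
lemma pv_len_eq (pool : List String) (royal : List String) (hn : royal.Nodup) (s : String)
    (hiff : ∀ c, ROYAL_SUIT.get? c = some s ↔ c ∈ royal) :
    PySem.Set.len (PySem.Set.ofList (pool.filter (fun c => ROYAL_SUIT.get? c == some s)))
    = ((royal.filter (fun c => decide (c ∈ pool))).length : Int) := by
  unfold PySem.Set.len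
  congr 1
  apply List.Perm.length_eq
  rw [List.perm_ext_iff_of_nodup (PySem.Set.nodup_ofList _) (hn.filter _)]
  intro c
  rw [PySem.Set.mem_ofList, List.mem_filter, List.mem_filter]
  constructor
  · rintro ⟨hp, hb⟩
    have := (hiff c).mp (by simpa using hb)
    exact ⟨this, by simpa using hp⟩
  · rintro ⟨hr, hp⟩
    exact ⟨by simpa using hp, by simp [(hiff c).mpr hr]⟩

-- ===== VERDICT (by name: the statement is the Claim_ definition above) =====
theorem leftHJTHS_spec : Claim_equal_leftHJTHS := by
  intro pool _
  unfold Spec_leftHJTHS leftHJTHS leftHJTHS_alt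
  have hsa : shunzi "a" 10 = some ["a10", "aJ", "aQ", "aK", "aA"] := by decide
  have hsb : shunzi "b" 10 = some ["b10", "bJ", "bQ", "bK", "bA"] := by decide
  have hsc : shunzi "c" 10 = some ["c10", "cJ", "cQ", "cK", "cA"] := by decide
  have hsd : shunzi "d" 10 = some ["d10", "dJ", "dQ", "dK", "dA"] := by decide
  simp only [ALL_SYMBOL, hsa, hsb, hsc, hsd, Option.getD, List.cons_append, List.nil_append,
    List.foldl, List.map]
  rw [pv_inner_eq, pv_inner_eq, pv_inner_eq, pv_inner_eq]
  rw [pv_bucket pool PySem.Dict.empty "a", pv_bucket pool PySem.Dict.empty "b",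
      pv_bucket pool PySem.Dict.empty "c", pv_bucket pool PySem.Dict.empty "d"]
  simp only [PySem.Dict.getD_empty]
  have hud : ∀ l : List String, PySem.Set.update ([] : PySem.Set String) l = PySem.Set.ofList l := fun l => rfl
  rw [hud, hud, hud, hud]
  rw [pv_len_eq pool _ (by decide) "a" (fun c => pv_lookup "a" ["a10", "aJ", "aQ", "aK", "aA"] c (by decide) (by decide)),
      pv_len_eq pool _ (by decide) "b" (fun c => pv_lookup "b" ["b10", "bJ", "bQ", "bK", "bA"] c (by decide) (by decide)),
      pv_len_eq pool _ (by decide) "c" (fun c => pv_lookup "c" ["c10", "cJ", "cQ", "cK", "cA"] c (by decide) (by decide)),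
      pv_len_eq pool _ (by decide) "d" (fun c => pv_lookup "d" ["d10", "dJ", "dQ", "dK", "dA"] c (by decide) (by decide))]
  rw [pv_max4]
  have ba := List.length_filter_le (fun c => decide (c ∈ pool)) ["a10", "aJ", "aQ", "aK", "aA"]
  have bb := List.length_filter_le (fun c => decide (c ∈ pool)) ["b10", "bJ", "bQ", "bK", "bA"]
  have bc := List.length_filter_le (fun c => decide (c ∈ pool)) ["c10", "cJ", "cQ", "cK", "cA"]
  have bd := List.length_filter_le (fun c => decide (c ∈ pool)) ["d10", "dJ", "dQ", "dK", "dA"]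
  simp only [List.length_cons, List.length_nil] at ba bb bc bd
  dsimp only
  omega
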